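-- pv_equiv track=rewrite | github.com/nicolashainaux/mathmaker | mathmaker/lib/sheet/exercise/question/calculation_modules/priorities_in_calculation_without_parentheses.py | adjust_nb_for_variant_13
-- ===== SOURCE A (Python) =====
-- def adjust_nb_for_variant_13(n1, n2, n3, n4):
--     """
--     Reorder the 4 numbers to ensure a×b - c÷d >= 0
--
--     May (recursively if needed) change some values by multiplying them
--     by 10 (if there's no other solution).
--     """
--     if n1 * n2 >= n3:
--         return (n1, n2, n3, n4)
--     if n1 * n2 >= n4:
--         return (n1, n2, n4, n3)
--     if n3 * n4 >= n1:
--         return (n3, n4, n1, n2)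
--     if n3 * n4 >= n1:
--         return (n3, n4, n2, n1)
--     return adjust_nb_for_variant_13(10 * max(n1, n2), min(n1, n2), n3, n4)
-- ===== SOURCE B (Python) =====
-- def adjust_nb_for_variant_13(n1, n2, n3, n4):
--     """Reorder the 4 numbers to ensure a*b - c/d >= 0 (iterative version)."""
--     while n1 * n2 < n3 and n1 * n2 < n4 and n3 * n4 < n1:
--         n1, n2 = 10 * max(n1, n2), min(n1, n2)
--     if n1 * n2 >= n3:
--         return (n1, n2, n3, n4)
--     if n1 * n2 >= n4:
--         return (n1, n2, n4, n3)
--     return (n3, n4, n1, n2)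
-- ===== Notes on version B (the rewrite author's own statement) =====
-- stated objective: idiomatic
-- what changed: Replaced the tail recursion and four-way return chain with a while loop that first drives (n1,n2) to a state where some condition holds, followed by a single selection of the output tuple after the loop (the duplicate dead fourth branch disappears).
import Mathlib
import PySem

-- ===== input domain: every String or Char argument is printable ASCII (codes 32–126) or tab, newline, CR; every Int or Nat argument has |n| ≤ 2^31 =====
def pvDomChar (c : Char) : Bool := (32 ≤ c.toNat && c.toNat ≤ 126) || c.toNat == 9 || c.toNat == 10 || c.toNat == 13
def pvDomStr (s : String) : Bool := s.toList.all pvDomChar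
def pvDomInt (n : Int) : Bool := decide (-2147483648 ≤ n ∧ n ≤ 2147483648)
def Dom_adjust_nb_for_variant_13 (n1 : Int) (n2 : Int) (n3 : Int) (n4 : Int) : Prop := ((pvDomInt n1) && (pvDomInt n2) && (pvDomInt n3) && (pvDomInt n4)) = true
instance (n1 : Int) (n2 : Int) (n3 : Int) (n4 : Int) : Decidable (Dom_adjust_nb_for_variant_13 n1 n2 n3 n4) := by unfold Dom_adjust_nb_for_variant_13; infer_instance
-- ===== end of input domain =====

-- B replaces A's tail recursion + four-way return chain by a while loop that updates (n1,n2)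
-- until some condition holds, followed by one selection of the output tuple (idiomatic, same cost).
-- Both ports use a fuel counter only to be total in Lean; under Pre_ (A terminates) fuel 64 suffices on Dom.

-- ===== PORT A =====
-- literal transliteration of A's recursion (fuel bounds the recursion depth; never reached under Pre_)
def adjustA : Nat → Int → Int → Int → Int → Int × Int × Int × Int
  | 0, n1, n2, n3, n4 => (n1, n2, n3, n4)
  | f + 1, n1, n2, n3, n4 =>
    if n1 * n2 ≥ n3 then (n1, n2, n3, n4)
    else if n1 * n2 ≥ n4 then (n1, n2, n4, n3)
    else if n3 * n4 ≥ n1 then (n3, n4, n1, n2)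
    else if n3 * n4 ≥ n1 then (n3, n4, n2, n1)  -- dead duplicate branch, kept from A
    else adjustA f (10 * max n1 n2) (min n1 n2) n3 n4

def adjust_nb_for_variant_13 (n1 : Int) (n2 : Int) (n3 : Int) (n4 : Int) : Int × Int × Int × Int :=
  adjustA 64 n1 n2 n3 n4

-- ===== PORT B =====
-- B's while loop: iterate the state update while all three conditions fail, return final (n1, n2)
def loopB : Nat → Int → Int → Int → Int → Int × Int
  | 0, n1, n2, _, _ => (n1, n2)
  | f + 1, n1, n2, n3, n4 =>
    if n1 * n2 < n3 ∧ n1 * n2 < n4 ∧ n3 * n4 < n1 then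
      loopB f (10 * max n1 n2) (min n1 n2) n3 n4
    else (n1, n2)

-- B's post-loop if-chain
def selectB (n3 n4 : Int) (p : Int × Int) : Int × Int × Int × Int :=
  if p.1 * p.2 ≥ n3 then (p.1, p.2, n3, n4)
  else if p.1 * p.2 ≥ n4 then (p.1, p.2, n4, n3)
  else (n3, n4, p.1, p.2)

def adjust_nb_for_variant_13_alt (n1 : Int) (n2 : Int) (n3 : Int) (n4 : Int) : Int × Int × Int × Int :=
  selectB n3 n4 (loopB 64 n1 n2 n3 n4)

-- ===== PRECONDITION & SPEC =====
-- Pre_ excludes exactly the inputs on which A recurses forever (Python raises RecursionError):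
-- all three conditions fail initially, min(n1,n2) ≤ 0, and they still fail at the rescaled state
-- (from which point the state evolution makes them fail forever).
def Pre_adjust_nb_for_variant_13 (n1 : Int) (n2 : Int) (n3 : Int) (n4 : Int) : Prop :=
  ¬ (n1 * n2 < n3 ∧ n1 * n2 < n4 ∧ n3 * n4 < n1 ∧ min n1 n2 ≤ 0 ∧
     10 * max n1 n2 * min n1 n2 < n3 ∧ 10 * max n1 n2 * min n1 n2 < n4 ∧
     n3 * n4 < 10 * max n1 n2)
instance (n1 : Int) (n2 : Int) (n3 : Int) (n4 : Int) : Decidable (Pre_adjust_nb_for_variant_13 n1 n2 n3 n4) := by unfold Pre_adjust_nb_for_variant_13; infer_instance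

def pvWitness_adjust_nb_for_variant_13 : Int × Int × Int × Int := (2, 3, 4, 5)

def Spec_adjust_nb_for_variant_13 (n1 : Int) (n2 : Int) (n3 : Int) (n4 : Int) (out : Int × Int × Int × Int) : Prop := out = adjust_nb_for_variant_13_alt n1 n2 n3 n4
instance (n1 : Int) (n2 : Int) (n3 : Int) (n4 : Int) (out : Int × Int × Int × Int) : Decidable (Spec_adjust_nb_for_variant_13 n1 n2 n3 n4 out) := by unfold Spec_adjust_nb_for_variant_13; infer_instance

-- ===== CLAIM (what is proved, stated in full; the proofs are below) =====
def Claim_equal_adjust_nb_for_variant_13 : Prop := ∀ (n1 : Int) (n2 : Int) (n3 : Int) (n4 : Int), Dom_adjust_nb_for_variant_13 n1 n2 n3 n4 → Pre_adjust_nb_for_variant_13 n1 n2 n3 n4 → Spec_adjust_nb_for_variant_13 n1 n2 n3 n4 (adjust_nb_for_variant_13 n1 n2 n3 n4)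

-- ===== LEMMAS AND PROOFS =====

-- "the recursion halts within f further steps"
def stopsIn : Nat → Int → Int → Int → Int → Prop
  | 0, n1, n2, n3, n4 => ¬ (n1 * n2 < n3 ∧ n1 * n2 < n4 ∧ n3 * n4 < n1)
  | f + 1, n1, n2, n3, n4 =>
    ¬ (n1 * n2 < n3 ∧ n1 * n2 < n4 ∧ n3 * n4 < n1) ∨
      stopsIn f (10 * max n1 n2) (min n1 n2) n3 n4

theorem chain_eq_selectB (n1 n2 n3 n4 : Int) (X : Int × Int × Int × Int)
    (h : ¬ (n1 * n2 < n3 ∧ n1 * n2 < n4 ∧ n3 * n4 < n1)) :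
    (if n1 * n2 ≥ n3 then (n1, n2, n3, n4)
     else if n1 * n2 ≥ n4 then (n1, n2, n4, n3)
     else if n3 * n4 ≥ n1 then (n3, n4, n1, n2)
     else if n3 * n4 ≥ n1 then (n3, n4, n2, n1)
     else X) = selectB n3 n4 (n1, n2) := by
  simp only [selectB]
  split_ifs <;> first | rfl | omega

theorem adjustA_eq_selectB (f : Nat) : ∀ (n1 n2 n3 n4 : Int),
    stopsIn f n1 n2 n3 n4 →
    adjustA (f + 1) n1 n2 n3 n4 = selectB n3 n4 (loopB (f + 1) n1 n2 n3 n4) := by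
  induction f with
  | zero =>
    intro n1 n2 n3 n4 h
    simp only [stopsIn] at h
    simp only [adjustA, loopB, if_neg h]
    exact chain_eq_selectB n1 n2 n3 n4 _ h
  | succ f ih =>
    intro n1 n2 n3 n4 h
    simp only [stopsIn] at h
    by_cases hc : n1 * n2 < n3 ∧ n1 * n2 < n4 ∧ n3 * n4 < n1
    · have hs : stopsIn f (10 * max n1 n2) (min n1 n2) n3 n4 := by tauto
      have hrec := ih (10 * max n1 n2) (min n1 n2) n3 n4 hs
      show (if n1 * n2 ≥ n3 then (n1, n2, n3, n4)
        else if n1 * n2 ≥ n4 then (n1, n2, n4, n3)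
        else if n3 * n4 ≥ n1 then (n3, n4, n1, n2)
        else if n3 * n4 ≥ n1 then (n3, n4, n2, n1)
        else adjustA (f + 1) (10 * max n1 n2) (min n1 n2) n3 n4)
        = selectB n3 n4 (loopB (f + 2) n1 n2 n3 n4)
      rw [if_neg (by omega), if_neg (by omega), if_neg (by omega), if_neg (by omega)]
      show _ = selectB n3 n4 (if n1 * n2 < n3 ∧ n1 * n2 < n4 ∧ n3 * n4 < n1
        then loopB (f + 1) (10 * max n1 n2) (min n1 n2) n3 n4 else (n1, n2))
      rw [if_pos hc]
      exact hrec
    · show (if n1 * n2 ≥ n3 then (n1, n2, n3, n4)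
        else if n1 * n2 ≥ n4 then (n1, n2, n4, n3)
        else if n3 * n4 ≥ n1 then (n3, n4, n1, n2)
        else if n3 * n4 ≥ n1 then (n3, n4, n2, n1)
        else adjustA (f + 1) (10 * max n1 n2) (min n1 n2) n3 n4)
        = selectB n3 n4 (loopB (f + 2) n1 n2 n3 n4)
      have : loopB (f + 2) n1 n2 n3 n4 = (n1, n2) := by
        show (if n1 * n2 < n3 ∧ n1 * n2 < n4 ∧ n3 * n4 < n1 then _ else (n1, n2)) = (n1, n2)
        rw [if_neg hc]
      rw [this]
      exact chain_eq_selectB n1 n2 n3 n4 _ hc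

-- once both state components are ≥ 1, the product eventually exceeds any c within the bound
theorem stopsIn_of_pow (f : Nat) : ∀ (a b c d : Int), 1 ≤ a → 1 ≤ b → b ≤ a →
    c ≤ 10 ^ f * (a * b) → stopsIn f a b c d := by
  induction f with
  | zero =>
    intro a b c d _ _ _ hc
    simp only [stopsIn]
    intro ⟨h1, _, _⟩
    simp at hc; omega
  | succ f ih =>
    intro a b c d ha hb hba hc
    by_cases hstop : ¬ (a * b < c ∧ a * b < d ∧ c * d < a)
    · exact Or.inl hstop
    · refine Or.inr ?_
      rw [max_eq_left hba, min_eq_right hba]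
      apply ih (10 * a) b c d (by omega) hb (by omega)
      calc c ≤ 10 ^ (f + 1) * (a * b) := hc
        _ = 10 ^ f * (10 * a * b) := by ring
  
theorem stops_of_pre (n1 n2 n3 n4 : Int)
    (hd : Dom_adjust_nb_for_variant_13 n1 n2 n3 n4)
    (hp : Pre_adjust_nb_for_variant_13 n1 n2 n3 n4) :
    stopsIn 63 n1 n2 n3 n4 := by
  by_cases hc : n1 * n2 < n3 ∧ n1 * n2 < n4 ∧ n3 * n4 < n1
  · refine Or.inr ?_
    by_cases hmn : min n1 n2 ≤ 0
    · -- Pre_ tells us the rescaled state already stops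
      refine Or.inl ?_
      unfold Pre_adjust_nb_for_variant_13 at hp
      tauto
    · -- min n1 n2 ≥ 1: the product grows by 10 each step, bound from Dom
      push Not at hmn
      have h1 : (1:Int) ≤ min n1 n2 := hmn
      have h2 : (1:Int) ≤ max n1 n2 := le_trans h1 (min_le_max)
      apply stopsIn_of_pow 62 (10 * max n1 n2) (min n1 n2) n3 n4 (by omega) h1
        (by have := min_le_max (a := n1) (b := n2); omega)
      have hn3 : n3 ≤ 2147483648 := by
        unfold Dom_adjust_nb_for_variant_13 pvDomInt at hd
        simp at hd; omega
      have hpow : (2147483648 : Int) ≤ 10 ^ 62 := by norm_num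
      have hprod : (1:Int) ≤ 10 * max n1 n2 * min n1 n2 := by nlinarith
      nlinarith [pow_pos (show (0:Int) < 10 by norm_num) 62]
  · exact Or.inl hc

-- ===== VERDICT (by name: the statement is the Claim_ definition above) =====
theorem adjust_nb_for_variant_13_spec : Claim_equal_adjust_nb_for_variant_13 := by
  intro n1 n2 n3 n4 hd hp
  unfold Spec_adjust_nb_for_variant_13 adjust_nb_for_variant_13 adjust_nb_for_variant_13_alt
  exact adjustA_eq_selectB 63 n1 n2 n3 n4 (stops_of_pre n1 n2 n3 n4 hd hp)
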